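-- pv_equiv track=rewrite | github.com/belkinot/DRESS-BA | dress_implementation.py | check_nl_constraints_in_clustering
-- ===== SOURCE A (Python) =====
-- def check_nl_constraints_in_clustering(constraints, clustering):
--     """Prüft wie viele NL-Constraints erfüllt sind"""
--     # Annahme: Clustering ist eine Liste von Listen mit Indizes ((1,2,5), (3,4), (6,9), (7,8))
--     constraint_sat = 0
--
--     for constraint in constraints:
--         for key in clustering:
--             if constraint[0] in clustering[key]:
--                 if constraint[1] not in clustering[key]:
--                     constraint_sat += 1
--
--     return constraint_sat
-- ===== SOURCE B (Python) =====
-- def check_nl_constraints_in_clustering(constraints, clustering):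
--     """Prüft wie viele NL-Constraints erfüllt sind (inverted index version)"""
--     idx = {}  # element -> list of keys whose cluster contains it
--     for key in clustering:
--         for e in set(clustering[key]):
--             idx.setdefault(e, []).append(key)
--     empty = []
--     total = 0
--     for constraint in constraints:
--         blocked = set(idx.get(constraint[1], empty))
--         for k in idx.get(constraint[0], empty):
--             if k not in blocked:
--                 total += 1
--     return total
-- ===== Notes on version B (the rewrite author's own statement) =====
-- stated objective: faster
-- what changed: B precomputes an inverted index mapping each element to the list of cluster keys containing it, then answers each constraint by scanning only the clusters containing constraint[0] (set lookup for constraint[1]) instead of rescanning every cluster per constraint.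
import Mathlib
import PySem

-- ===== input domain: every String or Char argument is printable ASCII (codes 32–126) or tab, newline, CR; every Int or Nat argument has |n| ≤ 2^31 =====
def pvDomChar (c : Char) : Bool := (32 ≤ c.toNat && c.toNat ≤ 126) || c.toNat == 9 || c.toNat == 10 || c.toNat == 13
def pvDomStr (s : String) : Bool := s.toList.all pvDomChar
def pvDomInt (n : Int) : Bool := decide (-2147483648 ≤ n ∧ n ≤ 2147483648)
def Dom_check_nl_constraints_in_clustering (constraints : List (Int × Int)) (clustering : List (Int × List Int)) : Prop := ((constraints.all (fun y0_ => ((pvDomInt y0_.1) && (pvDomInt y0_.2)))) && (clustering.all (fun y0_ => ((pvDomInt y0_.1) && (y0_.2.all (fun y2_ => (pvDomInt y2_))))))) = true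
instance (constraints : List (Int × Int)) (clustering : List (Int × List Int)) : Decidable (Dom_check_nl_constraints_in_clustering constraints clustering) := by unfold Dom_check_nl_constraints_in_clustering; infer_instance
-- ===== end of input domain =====

-- B replaces A's per-constraint scan over all clusters by a precomputed inverted index
-- element -> containing-cluster keys, making each constraint an O(1)-per-hit lookup (objective: faster).

-- ===== PORT A =====
-- A: for each constraint, scan every cluster key; count keys whose cluster contains
-- constraint[0] but not constraint[1].
def check_nl_constraints_in_clustering (constraints : List (Int × Int)) (clustering : List (Int × List Int)) : Int :=
  let d : PySem.Dict Int (List Int) := PySem.Dict.mk clustering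
  constraints.foldl (fun acc c =>
    d.keys.foldl (fun acc k =>
      if (d.getD k []).contains c.1 then
        if (d.getD k []).contains c.2 then acc else acc + 1
      else acc) acc) 0

-- ===== PORT B =====
-- B: build idx : element -> list of cluster keys containing it, then per constraint count
-- the keys in idx[c.1] that are not in the set of keys of idx[c.2].
def check_nl_constraints_in_clustering_alt (constraints : List (Int × Int)) (clustering : List (Int × List Int)) : Int :=
  let d : PySem.Dict Int (List Int) := PySem.Dict.mk clustering
  let idx : PySem.Dict Int (List Int) :=
    d.keys.foldl (fun idx k =>
      (PySem.Set.ofList (d.getD k [])).foldl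
        (fun idx e => idx.modify e [] (fun l => l ++ [k])) idx)
      PySem.Dict.empty
  constraints.foldl (fun tot c =>
    let blocked : PySem.Set Int := PySem.Set.ofList (idx.getD c.2 [])
    (idx.getD c.1 []).foldl (fun t k => if blocked.contains k then t else t + 1) tot) 0

-- ===== PRECONDITION & SPEC =====
def Spec_check_nl_constraints_in_clustering (constraints : List (Int × Int)) (clustering : List (Int × List Int)) (out : Int) : Prop := out = check_nl_constraints_in_clustering_alt constraints clustering
instance (constraints : List (Int × Int)) (clustering : List (Int × List Int)) (out : Int) : Decidable (Spec_check_nl_constraints_in_clustering constraints clustering out) := by unfold Spec_check_nl_constraints_in_clustering; infer_instance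

-- ===== CLAIM (what is proved, stated in full; the proofs are below) =====
def Claim_equal_check_nl_constraints_in_clustering : Prop := ∀ (constraints : List (Int × Int)) (clustering : List (Int × List Int)), Dom_check_nl_constraints_in_clustering constraints clustering → Spec_check_nl_constraints_in_clustering constraints clustering (check_nl_constraints_in_clustering constraints clustering)

-- ===== LEMMAS AND PROOFS =====

-- Inner index-building loop over the (deduplicated) elements of one cluster:
-- it appends k to idx[x] exactly when x is among those elements.
theorem pv_inner_getD (es : List Int) (k x : Int) (idx : PySem.Dict Int (List Int))
    (hnd : es.Nodup) :
    (es.foldl (fun i e => i.modify e [] (fun l => l ++ [k])) idx).getD x [] =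
      idx.getD x [] ++ (if x ∈ es then [k] else []) := by
  induction es generalizing idx with
  | nil => simp
  | cons e es ih =>
    simp only [List.foldl_cons]
    rw [ih _ hnd.of_cons]
    rw [PySem.Dict.getD_modify]
    by_cases hx : x = e
    · subst hx
      have : x ∉ es := (List.nodup_cons.mp hnd).1
      simp [this]
    · simp [hx, List.mem_cons]

-- The whole index-building loop: idx[x] is the list of keys whose cluster contains x.
theorem pv_idx_getD (d : PySem.Dict Int (List Int)) (ks : List Int) (idx : PySem.Dict Int (List Int)) (x : Int) :
    (ks.foldl (fun idx k =>
        (PySem.Set.ofList (d.getD k [])).foldl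
          (fun idx e => idx.modify e [] (fun l => l ++ [k])) idx) idx).getD x [] =
      idx.getD x [] ++ ks.filter (fun k => (d.getD k []).contains x) := by
  induction ks generalizing idx with
  | nil => simp
  | cons k ks ih =>
    simp only [List.foldl_cons]
    rw [ih]
    rw [pv_inner_getD _ _ _ _ (PySem.Set.nodup_ofList _)]
    by_cases hm : x ∈ d.getD k [] <;> simp [hm]

-- Per-constraint: A's scan over all cluster keys counts the same keys B reads off the index.
theorem pv_constraint_eq (d : PySem.Dict Int (List Int)) (c : Int × Int) (acc : Int)
    (idx : PySem.Dict Int (List Int))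
    (hidx : ∀ x, idx.getD x [] = d.keys.filter (fun k => (d.getD k []).contains x)) :
    d.keys.foldl (fun acc k =>
        if (d.getD k []).contains c.1 then
          if (d.getD k []).contains c.2 then acc else acc + 1
        else acc) acc =
      (idx.getD c.1 []).foldl
        (fun t k => if (PySem.Set.ofList (idx.getD c.2 [])).contains k then t else t + 1) acc := by
  have hA : List.foldl (fun acc k =>
        if (d.getD k []).contains c.1 then
          if (d.getD k []).contains c.2 then acc else acc + 1
        else acc) acc d.keys
      = List.foldl (fun acc k =>
          if ((d.getD k []).contains c.1 && !(d.getD k []).contains c.2) then acc + 1 else acc)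
          acc d.keys := by
    refine PySem.List.foldl_congr_mem _ _ _ _ ?_
    intro a k _
    cases h1 : (d.getD k []).contains c.1 <;> cases h2 : (d.getD k []).contains c.2 <;> simp
  have hB : List.foldl
        (fun t k => if (PySem.Set.ofList (idx.getD c.2 [])).contains k then t else t + 1)
        acc (idx.getD c.1 [])
      = List.foldl
        (fun t k => if (!(PySem.Set.ofList (idx.getD c.2 [])).contains k) then t + 1 else t)
        acc (idx.getD c.1 []) := by
    refine PySem.List.foldl_congr_mem _ _ _ _ ?_
    intro a k _
    cases h : (PySem.Set.ofList (idx.getD c.2 [])).contains k <;> simp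
  rw [hA, hB, PySem.List.foldl_if_add_one, PySem.List.foldl_if_add_one]
  congr 1
  rw [hidx c.1, List.countP_filter]
  congr 1
  refine List.countP_congr ?_
  intro k hk
  have hki : (k ∈ idx.getD c.2 []) ↔ c.2 ∈ d.getD k [] := by
    rw [hidx, List.mem_filter]
    simp [hk]
  by_cases h2 : c.2 ∈ d.getD k [] <;>
    simp [hki, h2]

-- ===== VERDICT (by name: the statement is the Claim_ definition above) =====
theorem check_nl_constraints_in_clustering_spec : Claim_equal_check_nl_constraints_in_clustering := by
  intro constraints clustering _
  unfold Spec_check_nl_constraints_in_clustering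
  unfold check_nl_constraints_in_clustering check_nl_constraints_in_clustering_alt
  dsimp only
  refine PySem.List.foldl_congr_mem _ _ _ _ ?_
  intro acc c _
  exact pv_constraint_eq (PySem.Dict.mk clustering) c acc _
    (fun x => by rw [pv_idx_getD]; simp)
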